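-- pv_equiv track=rewrite | github.com/KimkyoungJins/PANNs_SleepTech | process_sleep_data.py | stages_to_epoch_labels
-- ===== SOURCE A (Python) =====
-- EPOCH_SEC = 30
--
-- def stages_to_epoch_labels(stages, total_duration_sec):
--     """Stage 전환 목록 → 30초 에포크별 라벨 리스트"""
--     n_epochs = total_duration_sec // EPOCH_SEC
--     labels = [None] * n_epochs
--     for idx in range(n_epochs):
--         t = idx * EPOCH_SEC
--         cur = None
--         for start, label in stages:
--             if start <= t:
--                 cur = label
--             else:
--                 break
--         labels[idx] = cur
--     return labels
-- ===== SOURCE B (Python) =====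
-- EPOCH_SEC = 30
--
-- def stages_to_epoch_labels(stages, total_duration_sec):
--     """Stage transition list -> per-30s-epoch labels, by a single two-pointer sweep."""
--     n_epochs = total_duration_sec // EPOCH_SEC
--     labels = []
--     j = 0
--     cur = None
--     n_stages = len(stages)
--     for idx in range(n_epochs):
--         t = idx * EPOCH_SEC
--         while j < n_stages and stages[j][0] <= t:
--             cur = stages[j][1]
--             j += 1
--         labels.append(cur)
--     return labels
-- ===== Notes on version B (the rewrite author's own statement) =====
-- stated objective: faster
-- what changed: Replaces the per-epoch rescan of the stage list with a single two-pointer sweep: since epoch times are increasing and A only ever consumes a growing prefix of stages, B keeps one cursor into stages and the current label across epochs.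
import Mathlib
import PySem

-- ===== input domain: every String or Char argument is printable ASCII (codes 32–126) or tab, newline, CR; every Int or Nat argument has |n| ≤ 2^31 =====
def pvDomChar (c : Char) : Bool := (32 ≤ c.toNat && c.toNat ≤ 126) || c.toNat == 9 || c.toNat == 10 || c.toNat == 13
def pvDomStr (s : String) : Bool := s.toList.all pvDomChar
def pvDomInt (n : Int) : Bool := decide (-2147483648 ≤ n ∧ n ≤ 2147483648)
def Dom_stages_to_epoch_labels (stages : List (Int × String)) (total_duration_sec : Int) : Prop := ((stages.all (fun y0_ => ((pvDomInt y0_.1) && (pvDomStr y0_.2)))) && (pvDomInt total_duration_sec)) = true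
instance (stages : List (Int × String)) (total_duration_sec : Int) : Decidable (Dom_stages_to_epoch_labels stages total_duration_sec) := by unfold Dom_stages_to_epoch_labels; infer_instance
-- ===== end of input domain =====

-- B replaces A's per-epoch rescan of the stage list by a single two-pointer sweep
-- (one cursor into `stages` carried across the increasing epoch times): faster by the
-- measured/asymptotic count of inner-loop steps.

-- ===== PORT A =====
-- inner `for start, label in stages: if start <= t: cur = label else: break`
def pvInnerA : List (Int × String) → Int → Option String → Option String
  | [], _, cur => cur
  | (start, label) :: rest, t, cur =>
      if start ≤ t then pvInnerA rest t (some label) else cur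

def stages_to_epoch_labels (stages : List (Int × String)) (total_duration_sec : Int) : List (Option String) :=
  let n_epochs := PySem.Int.floordiv total_duration_sec 30
  -- labels = [None]*n; labels[idx] = cur for each idx in range(n)  ≡  one entry per idx
  (PySem.List.pyRange 0 n_epochs 1).map (fun idx => pvInnerA stages (idx * 30) none)

-- ===== PORT B =====
-- the `while j < n_stages and stages[j][0] <= t:` loop of Source B
def pvAltWhile (stages : List (Int × String)) (t : Int) (j : Nat) (cur : Option String) :
    Nat × Option String :=
  if h : j < stages.length then
    if stages[j].1 ≤ t then pvAltWhile stages t (j + 1) (some stages[j].2) else (j, cur)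
  else (j, cur)
termination_by stages.length - j

def stages_to_epoch_labels_alt (stages : List (Int × String)) (total_duration_sec : Int) : List (Option String) :=
  let n_epochs := PySem.Int.floordiv total_duration_sec 30
  let st := (PySem.List.pyRange 0 n_epochs 1).foldl
    (fun (s : Nat × Option String × List (Option String)) idx =>
      let r := pvAltWhile stages (idx * 30) s.1 s.2.1
      (r.1, r.2, s.2.2 ++ [r.2])) (0, none, [])
  st.2.2

-- ===== PRECONDITION & SPEC =====
def Spec_stages_to_epoch_labels (stages : List (Int × String)) (total_duration_sec : Int) (out : List (Option String)) : Prop := out = stages_to_epoch_labels_alt stages total_duration_sec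
instance (stages : List (Int × String)) (total_duration_sec : Int) (out : List (Option String)) : Decidable (Spec_stages_to_epoch_labels stages total_duration_sec out) := by unfold Spec_stages_to_epoch_labels; infer_instance

-- ===== CLAIM (what is proved, stated in full; the proofs are below) =====
def Claim_equal_stages_to_epoch_labels : Prop := ∀ (stages : List (Int × String)) (total_duration_sec : Int), Dom_stages_to_epoch_labels stages total_duration_sec → Spec_stages_to_epoch_labels stages total_duration_sec (stages_to_epoch_labels stages total_duration_sec)

-- ===== LEMMAS AND PROOFS =====

-- label of the last element of C, defaulting to c
def pvLastLab (C : List (Int × String)) (c : Option String) : Option String :=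
  match C.getLast? with
  | some p => some p.2
  | none => c

theorem pvLastLab_append (C C' : List (Int × String)) (c : Option String) :
    pvLastLab (C ++ C') c = pvLastLab C' (pvLastLab C c) := by
  unfold pvLastLab
  rw [List.getLast?_append]
  cases C'.getLast? <;> simp

-- L1: characterisation of the while loop at cursor position C.length
theorem pvAltWhile_spec (t : Int) (cur : Option String) :
    ∀ (R C : List (Int × String)),
      pvAltWhile (C ++ R) t C.length cur =
        (C.length + (R.takeWhile (fun p => decide (p.1 ≤ t))).length, pvInnerA R t cur) := by
  intro R
  induction R generalizing cur with
  | nil =>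
      intro C
      rw [pvAltWhile]
      simp [pvInnerA]
  | cons x R' ih =>
      intro C
      rw [pvAltWhile]
      have hlen : C.length < (C ++ x :: R').length := by simp
      have hget : (C ++ x :: R')[C.length]'hlen = x := by
        rw [List.getElem_append_right (by omega)]
        simp
      obtain ⟨s, l⟩ := x
      simp only [hlen, dif_pos, hget]
      by_cases hs : s ≤ t
      · have := ih (some l) (C ++ [(s, l)])
        simp only [List.append_assoc, List.length_append, List.length_cons] at this
        simp only [pvInnerA, List.takeWhile_cons, hs, decide_true]
        rw [show C.length + 1 = C.length + 1 from rfl]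
        simpa [Nat.add_comm, Nat.add_assoc, Nat.add_left_comm, if_pos hs] using this
      · simp [pvInnerA, hs]

-- L2: inner loop splits over a prefix whose starts are all ≤ t
theorem pvInnerA_append (t : Int) :
    ∀ (C R : List (Int × String)) (c : Option String), (∀ p ∈ C, p.1 ≤ t) →
      pvInnerA (C ++ R) t c = pvInnerA R t (pvInnerA C t c) := by
  intro C
  induction C with
  | nil => intro R c _; simp [pvInnerA]
  | cons x C' ih =>
      intro R c h
      obtain ⟨s, l⟩ := x
      have hs : s ≤ t := h (s, l) (by simp)
      simp only [List.cons_append, pvInnerA, if_pos hs]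
      exact ih R (some l) (fun p hp => h p (by simp [hp]))

-- L3: when all starts are ≤ t, the inner loop returns the last label
theorem pvInnerA_all_le (t : Int) :
    ∀ (C : List (Int × String)) (c : Option String), (∀ p ∈ C, p.1 ≤ t) →
      pvInnerA C t c = pvLastLab C c := by
  intro C
  induction C with
  | nil => intro c _; simp [pvInnerA, pvLastLab]
  | cons x C' ih =>
      intro c h
      obtain ⟨s, l⟩ := x
      have hs : s ≤ t := h (s, l) (by simp)
      simp only [pvInnerA, if_pos hs]
      rw [ih (some l) (fun p hp => h p (by simp [hp]))]
      unfold pvLastLab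
      cases hC : C'.getLast? with
      | none => simp [List.getLast?_eq_none_iff.mp hC]
      | some p =>
          have : C' ≠ [] := by
            intro hnil; rw [hnil] at hC; simp at hC
          simp [List.getLast?_cons, hC]

-- L5: inner loop is the identity when the first start is already > t
theorem pvInnerA_head_gt (t : Int) (R : List (Int × String)) (c : Option String)
    (h : ∀ p, R.head? = some p → ¬ p.1 ≤ t) : pvInnerA R t c = c := by
  cases R with
  | nil => rfl
  | cons x R' =>
      obtain ⟨s, l⟩ := x
      have := h (s, l) rfl
      simp [pvInnerA, this]

theorem pv_dropWhile_head (t : Int) :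
    ∀ (R : List (Int × String)) (p : Int × String),
      (R.dropWhile (fun q => decide (q.1 ≤ t))).head? = some p → ¬ p.1 ≤ t := by
  intro R
  induction R with
  | nil => intro p h; simp [List.dropWhile] at h
  | cons x R' ih =>
      intro p h
      rw [List.dropWhile_cons] at h
      by_cases hx : x.1 ≤ t
      · exact ih p (by simpa [hx] using h)
      · simp [hx] at h; subst h; exact hx

-- the fold invariant: cursor = consumed-prefix length, cur = its last label
theorem pv_fold_invariant (S : List (Int × String)) :
    ∀ (l : List Int), l.Pairwise (· ≤ ·) →
      ∀ (C R : List (Int × String)) (acc : List (Option String)), S = C ++ R →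
        (∀ p ∈ C, ∀ i ∈ l, p.1 ≤ i * 30) →
        (l.foldl
          (fun (s : Nat × Option String × List (Option String)) idx =>
            let r := pvAltWhile S (idx * 30) s.1 s.2.1
            (r.1, r.2, s.2.2 ++ [r.2])) (C.length, pvLastLab C none, acc)).2.2 =
        acc ++ l.map (fun i => pvInnerA S (i * 30) none) := by
  intro l
  induction l with
  | nil => intro _ C R acc _ _; simp
  | cons i l' ih =>
      intro hpw C R acc hS hC
      have hpw' : l'.Pairwise (· ≤ ·) := hpw.of_cons
      have hile : ∀ i' ∈ l', i ≤ i' := fun i' hi' => (List.pairwise_cons.mp hpw).1 i' hi'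
      have hCle : ∀ p ∈ C, p.1 ≤ i * 30 := fun p hp => hC p hp i (by simp)
      set W := R.takeWhile (fun q => decide (q.1 ≤ i * 30)) with hW
      set R'' := R.dropWhile (fun q => decide (q.1 ≤ i * 30)) with hR''
      have hWle : ∀ p ∈ W, p.1 ≤ i * 30 := by
        intro p hp
        have := List.mem_takeWhile_imp hp
        simpa using this
      have hRsplit : R = W ++ R'' := (List.takeWhile_append_dropWhile).symm
      -- the while-loop step
      have hstep : pvAltWhile S (i * 30) C.length (pvLastLab C none) =
          (C.length + W.length, pvInnerA R (i * 30) (pvLastLab C none)) := by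
        rw [hS]; exact pvAltWhile_spec (i * 30) (pvLastLab C none) R C
      -- the produced label equals A's inner loop on the whole list
      have hcurA : pvInnerA R (i * 30) (pvLastLab C none) = pvInnerA S (i * 30) none := by
        rw [hS, pvInnerA_append (i * 30) C R none hCle,
          pvInnerA_all_le (i * 30) C none hCle]
      -- the produced label is the last label of the new consumed prefix C ++ W
      have hcurL : pvInnerA R (i * 30) (pvLastLab C none) = pvLastLab (C ++ W) none := by
        rw [hRsplit, pvInnerA_append (i * 30) W R'' _ hWle,
          pvInnerA_all_le (i * 30) W _ hWle,
          pvInnerA_head_gt (i * 30) R'' _ (fun p hp => pv_dropWhile_head (i * 30) R p (by rw [← hR'']; exact hp)),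
          pvLastLab_append]
      have hlen : C.length + W.length = (C ++ W).length := by simp
      have hC' : ∀ p ∈ C ++ W, ∀ i' ∈ l', p.1 ≤ i' * 30 := by
        intro p hp i' hi'
        rcases List.mem_append.mp hp with hpC | hpW
        · exact hC p hpC i' (by simp [hi'])
        · calc p.1 ≤ i * 30 := hWle p hpW
            _ ≤ i' * 30 := by have := hile i' hi'; nlinarith [hile i' hi']
      have hS' : S = (C ++ W) ++ R'' := by rw [hS, hRsplit, List.append_assoc]
      simp only [List.foldl_cons, hstep, hlen, hcurL]
      rw [ih hpw' (C ++ W) R'' (acc ++ [pvLastLab (C ++ W) none]) hS' hC']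
      simp [← hcurL, hcurA]

-- ===== VERDICT (by name: the statement is the Claim_ definition above) =====
theorem stages_to_epoch_labels_spec : Claim_equal_stages_to_epoch_labels := by
  intro stages total _
  unfold Spec_stages_to_epoch_labels stages_to_epoch_labels stages_to_epoch_labels_alt
  have hpw : (PySem.List.pyRange 0 (PySem.Int.floordiv total 30) 1).Pairwise (· ≤ ·) :=
    (PySem.List.pairwise_lt_pyRange_one 0 (PySem.Int.floordiv total 30)).imp
      (fun h => le_of_lt h)
  have := pv_fold_invariant stages (PySem.List.pyRange 0 (PySem.Int.floordiv total 30) 1)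
    hpw [] stages [] rfl (by simp)
  simp only [List.length_nil, List.nil_append] at this
  simp only [pvLastLab] at this ⊢
  exact this.symm
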